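-- pv_equiv track=rewrite | github.com/manwar/perlweeklychallenge-club | challenge-325/lubos-kolouch/python/ch-2.py | final_price
-- ===== SOURCE A (Python) =====
-- from typing import List
--
-- def final_price(prices: List[int]) -> List[int]:
--     result: List[int] = []
--     n = len(prices)
--     for i, price in enumerate(prices):
--         discount = 0
--         for j in range(i + 1, n):
--             if prices[j] <= price:
--                 discount = prices[j]
--                 break
--         result.append(price - discount)
--     return result
-- ===== SOURCE B (Python) =====
-- def final_price(prices):
--     # O(n) monotonic stack, scanning right-to-left; stack keeps candidate
--     # discounts, its top is always the next price <= the current one.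
--     res = []
--     stack = []
--     for p in reversed(prices):
--         while stack and stack[-1] > p:
--             stack.pop()
--         res.append(p - (stack[-1] if stack else 0))
--         stack.append(p)
--     res.reverse()
--     return res
-- ===== Notes on version B (the rewrite author's own statement) =====
-- stated objective: faster
-- what changed: Replaces the per-element forward scan for the next price <= current with a single right-to-left pass maintaining a monotonic stack of candidate discounts.
import Mathlib
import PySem

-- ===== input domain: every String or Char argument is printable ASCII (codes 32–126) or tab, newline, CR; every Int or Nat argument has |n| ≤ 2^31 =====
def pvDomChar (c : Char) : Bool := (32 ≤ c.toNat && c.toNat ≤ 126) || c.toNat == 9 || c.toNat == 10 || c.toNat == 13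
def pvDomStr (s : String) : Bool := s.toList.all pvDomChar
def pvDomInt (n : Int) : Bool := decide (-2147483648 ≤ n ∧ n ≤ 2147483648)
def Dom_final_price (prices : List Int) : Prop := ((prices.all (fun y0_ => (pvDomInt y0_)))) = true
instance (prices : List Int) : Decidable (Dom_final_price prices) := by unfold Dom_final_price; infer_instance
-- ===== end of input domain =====

-- B replaces A's per-element forward scan (O(n^2)) by one right-to-left pass
-- with a monotonic stack (O(n)); same return value on every input.

-- ===== PORT A =====
-- inner 'for j in range(i+1, n): if prices[j] <= price: discount = prices[j]; break'
def pvInnerA (prices : List Int) (price : Int) : List Int → Int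
  | [] => 0
  | j :: js =>
    match PySem.List.pyGet? prices j with
    | some v => if v ≤ price then v else pvInnerA prices price js
    | none => 0  -- unreachable: j always in range(i+1, len(prices))

def final_price (prices : List Int) : List Int :=
  let n : Int := prices.length
  (PySem.List.enumerate prices 0).foldl
    (fun result ip =>
      result ++ [ip.2 - pvInnerA prices ip.2 (PySem.List.pyRange (ip.1 + 1) n 1)]) []

-- ===== PORT B =====
-- 'while stack and stack[-1] > p: stack.pop()'
def pvPopGT (p : Int) : List Int → List Int
  | [] => []
  | x :: xs => if x > p then pvPopGT p xs else x :: xs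

def final_price_alt (prices : List Int) : List Int :=
  (prices.reverse.foldl
    (fun (acc : List Int × List Int) p =>
      let s := pvPopGT p acc.2
      (acc.1 ++ [p - s.headD 0], p :: s))
    ([], [])).1.reverse

-- ===== PRECONDITION & SPEC =====
def Spec_final_price (prices : List Int) (out : List Int) : Prop := out = final_price_alt prices
instance (prices : List Int) (out : List Int) : Decidable (Spec_final_price prices out) := by unfold Spec_final_price; infer_instance

-- ===== CLAIM (what is proved, stated in full; the proofs are below) =====
def Claim_equal_final_price : Prop := ∀ (prices : List Int), Dom_final_price prices → Spec_final_price prices (final_price prices)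

-- ===== LEMMAS AND PROOFS =====

-- first element ≤ p of a list, else 0 (the discount both programs compute)
def pvFirstLe (p : Int) : List Int → Int
  | [] => 0
  | x :: xs => if x ≤ p then x else pvFirstLe p xs

-- the common reference result
def pvSpecList : List Int → List Int
  | [] => []
  | p :: rest => (p - pvFirstLe p rest) :: pvSpecList rest

lemma pvInnerA_range (prices : List Int) (price : Int) :
    ∀ (k a : Nat), prices.length - a = k →
    pvInnerA prices price (PySem.List.pyRange a prices.length 1)
      = pvFirstLe price (prices.drop a) := by
  intro k
  induction k with
  | zero =>
    intro a ha
    have h1 : (prices.length : Int) ≤ (a : Int) := by exact_mod_cast Nat.le_of_sub_eq_zero ha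
    rw [PySem.List.pyRange_one_eq_nil h1, List.drop_eq_nil_of_le (Nat.le_of_sub_eq_zero ha)]
    rfl
  | succ k ih =>
    intro a ha
    have hlt : a < prices.length := by omega
    have h1 : (a : Int) < (prices.length : Int) := by exact_mod_cast hlt
    rw [PySem.List.pyRange_one_cons h1]
    have hget : PySem.List.pyGet? prices (a : Int) = some prices[a] := by
      simp [hlt]
    have hdrop : prices.drop a = prices[a] :: prices.drop (a + 1) :=
      List.drop_eq_getElem_cons hlt
    have hcast : (a : Int) + 1 = ((a + 1 : Nat) : Int) := by push_cast; ring
    rw [hdrop]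
    simp only [pvInnerA, hget, pvFirstLe, hcast]
    rw [ih (a + 1) (by omega)]

lemma final_price_eq_spec (prices : List Int) :
    final_price prices = pvSpecList prices := by
  show (PySem.List.enumerate prices 0).foldl _ [] = _
  rw [PySem.List.foldl_append_singleton_eq_map]
  suffices h : ∀ (k s : Nat), prices.length - s = k →
      (PySem.List.enumerate (prices.drop s) (s : Int)).map
        (fun ip => ip.2 - pvInnerA prices ip.2
          (PySem.List.pyRange (ip.1 + 1) (prices.length : Int) 1))
        = pvSpecList (prices.drop s) by
    have := h prices.length 0 (by omega)
    simpa using this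
  intro k
  induction k with
  | zero =>
    intro s hs
    rw [List.drop_eq_nil_of_le (Nat.le_of_sub_eq_zero hs)]
    rfl
  | succ k ih =>
    intro s hs
    have hlt : s < prices.length := by omega
    have hdrop : prices.drop s = prices[s] :: prices.drop (s + 1) :=
      List.drop_eq_getElem_cons hlt
    rw [hdrop, PySem.List.enumerate_cons, List.map_cons]
    have hcast : (s : Int) + 1 = ((s + 1 : Nat) : Int) := by push_cast; ring
    rw [hcast]
    rw [ih (s + 1) (by omega)]
    simp only [pvSpecList]
    rw [pvInnerA_range prices prices[s] (prices.length - (s + 1)) (s + 1) rfl]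

lemma pvPopGT_popGT (p x : Int) (h : p ≤ x) :
    ∀ s : List Int, pvPopGT p (pvPopGT x s) = pvPopGT p s := by
  intro s
  induction s with
  | nil => rfl
  | cons y ys ih =>
    by_cases hy : y > x
    · simp only [pvPopGT, if_pos hy, if_pos (by omega : y > p), ih]
    · simp only [pvPopGT, if_neg hy]

-- the stack after processing a suffix right-to-left
def pvStack : List Int → List Int
  | [] => []
  | p :: rest => p :: pvPopGT p (pvStack rest)

lemma pvStack_top (p : Int) :
    ∀ rest : List Int, (pvPopGT p (pvStack rest)).headD 0 = pvFirstLe p rest := by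
  intro rest
  induction rest with
  | nil => rfl
  | cons x xs ih =>
    by_cases hx : x > p
    · simp only [pvStack, pvPopGT, if_pos hx, pvFirstLe, if_neg (by omega : ¬ x ≤ p),
        pvPopGT_popGT p x (by omega), ih]
    · simp only [pvStack, pvPopGT, if_neg hx, pvFirstLe, if_pos (by omega : x ≤ p),
        List.headD_cons]

lemma foldl_rev_eq (l : List Int) :
    l.reverse.foldl
      (fun (acc : List Int × List Int) p =>
        let s := pvPopGT p acc.2
        (acc.1 ++ [p - s.headD 0], p :: s))
      ([], []) = ((pvSpecList l).reverse, pvStack l) := by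
  induction l with
  | nil => rfl
  | cons p rest ih =>
    rw [List.reverse_cons, List.foldl_append, ih]
    simp only [List.foldl_cons, List.foldl_nil, pvSpecList, pvStack, List.reverse_cons,
      pvStack_top]

lemma final_price_alt_eq_spec (prices : List Int) :
    final_price_alt prices = pvSpecList prices := by
  unfold final_price_alt
  rw [foldl_rev_eq]
  simp

-- ===== VERDICT (by name: the statement is the Claim_ definition above) =====
theorem final_price_spec : Claim_equal_final_price := by
  intro prices _
  unfold Spec_final_price
  rw [final_price_eq_spec, final_price_alt_eq_spec]
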